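-- pv_equiv track=rewrite | github.com/YunqiuXu/my_notes | UNSW/COMP9318/Project/submissionLRKNN.py | check
-- ===== SOURCE A (Python) =====
-- def check(splitted_list):
--     count = 0
--     target = 0
--     removed_stress = []
--     for item in splitted_list[:]:
--         try: # vowel
--             curr = int(item[-1])
--             removed_stress.append(item[:-1])
--             count += 1
--             if curr == 1:
--                 target = count
--         except: # consonant
--             removed_stress.append(item)
--     return removed_stress, target
-- ===== SOURCE B (Python) =====
-- def _last_digit(item):
--     try:
--         return int(item[-1])
--     except:
--         return None
--
-- def check(splitted_list):
--     parsed = [_last_digit(item) for item in splitted_list]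
--     removed_stress = [it if d is None else it[:-1]
--                       for it, d in zip(splitted_list, parsed)]
--     vowels = [d for d in parsed if d is not None]
--     try:
--         target = len(vowels) - vowels[::-1].index(1)
--     except ValueError:
--         target = 0
--     return removed_stress, target
-- ===== Notes on version B (the rewrite author's own statement) =====
-- stated objective: alternative
-- what changed: B replaces A's single stateful loop (count/target/list accumulators) by precomputing the parsed trailing digits once, building the stripped list by zipping, filtering out the vowel digits, and obtaining the stress position as len(vowels) minus the reverse-index of the last digit 1.
import Mathlib
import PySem

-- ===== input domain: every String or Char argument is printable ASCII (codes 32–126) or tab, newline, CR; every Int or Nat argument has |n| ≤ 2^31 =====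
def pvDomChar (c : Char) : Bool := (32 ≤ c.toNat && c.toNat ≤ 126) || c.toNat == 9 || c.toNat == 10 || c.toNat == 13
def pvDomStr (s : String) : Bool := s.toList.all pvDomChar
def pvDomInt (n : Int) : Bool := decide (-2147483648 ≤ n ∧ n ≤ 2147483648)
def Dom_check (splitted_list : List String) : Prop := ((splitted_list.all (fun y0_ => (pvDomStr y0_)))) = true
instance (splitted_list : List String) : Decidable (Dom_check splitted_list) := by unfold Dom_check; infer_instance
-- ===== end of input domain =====

-- B change: instead of A's single stateful loop, B precomputes the parsed trailing digits once,
-- builds the stripped list by zipping, and finds the stress position by a reverse index search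
-- over the filtered digit list (objective: alternative).

-- ===== PORT A =====
-- int(item[-1]): item[-1] is Str.pyGet? item (-1); the try-block succeeds iff this Option chain
-- does (IndexError on empty item, ValueError on a non-digit last char).
def checkStep (acc : Int × Int × List String) (item : String) : Int × Int × List String :=
  match (PySem.Str.pyGet? item (-1)).bind (fun c => PySem.Int.ofChars? [c]) with
  | some curr =>
      (acc.1 + 1, if curr == 1 then acc.1 + 1 else acc.2.1,
       acc.2.2 ++ [PySem.Str.slice item none (some (-1))])
  | none => (acc.1, acc.2.1, acc.2.2 ++ [item])

def check (splitted_list : List String) : List String × Int :=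
  let st := splitted_list.foldl checkStep (0, 0, [])
  (st.2.2, st.2.1)

-- ===== PORT B =====
-- _last_digit(item): int(item[-1]) or None
def lastDigit? (item : String) : Option Int :=
  (PySem.Str.pyGet? item (-1)).bind (fun c => PySem.Int.ofChars? [c])

-- vowels[::-1] is ported as List.reverse (PySem.List.slice?_none_none_neg_one);
-- .index(1) with except ValueError is ported as index? with the none branch.
def check_alt (splitted_list : List String) : List String × Int :=
  let parsed := splitted_list.map lastDigit?
  let removed_stress := (splitted_list.zip parsed).map
    (fun p => match p.2 with
      | none => p.1
      | some _ => PySem.Str.slice p.1 none (some (-1)))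
  let vowels := parsed.filterMap id
  let target : Int :=
    match PySem.List.index? vowels.reverse 1 with
    | some i => (vowels.length : Int) - (i : Int)
    | none => 0
  (removed_stress, target)

-- ===== PRECONDITION & SPEC =====
def Spec_check (splitted_list : List String) (out : List String × Int) : Prop := out = check_alt splitted_list
instance (splitted_list : List String) (out : List String × Int) : Decidable (Spec_check splitted_list out) := by unfold Spec_check; infer_instance

-- ===== CLAIM (what is proved, stated in full; the proofs are below) =====
def Claim_equal_check : Prop := ∀ (splitted_list : List String), Dom_check splitted_list → Spec_check splitted_list (check splitted_list)

-- ===== LEMMAS AND PROOFS =====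

-- the target value of A's fold, characterised by a reverse index search over the vowel digits
def pvT (c t : Int) (V : List Int) : Int :=
  match PySem.List.index? V.reverse 1 with
  | some i => c + (V.length : Int) - (i : Int)
  | none => t

def pvStrip (p : String × Option Int) : String :=
  match p.2 with
  | none => p.1
  | some _ => PySem.Str.slice p.1 none (some (-1))

lemma index?_append_none {l : List Int} {x : Int}
    (hl : PySem.List.index? l 1 = none) (hx : x ≠ 1) :
    PySem.List.index? (l ++ [x]) 1 = none := by
  rw [PySem.List.index?_eq_none_iff] at hl ⊢
  simp [List.mem_append, hl]
  exact fun h => hx h.symm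

lemma pvT_cons (c t curr : Int) (V : List Int) :
    pvT (c + 1) (if curr == 1 then c + 1 else t) V = pvT c t (curr :: V) := by
  unfold pvT
  rw [List.reverse_cons]
  cases hi : PySem.List.index? V.reverse 1 with
  | some i =>
      have h1 : (1:Int) ∈ V.reverse := by
        rw [← PySem.List.index?_isSome_iff, hi]; rfl
      rw [PySem.List.index?_append_of_mem _ h1, hi]
      simp only [List.length_cons]
      push_cast; ring
  | none =>
      have h1 : (1:Int) ∉ V.reverse := (PySem.List.index?_eq_none_iff _ _).mp hi
      by_cases hc : curr = 1
      · subst hc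
        rw [PySem.List.index?_append_singleton_self _ _ h1]
        simp only [List.length_cons, List.length_reverse]
        rw [if_pos]
        · push_cast; ring
        · simp
      · rw [index?_append_none hi hc]
        simp [hc]

lemma fold_char (l : List String) : ∀ (c t : Int) (rs : List String),
    l.foldl checkStep (c, t, rs)
      = (c + (((l.map lastDigit?).filterMap id).length : Int),
         pvT c t ((l.map lastDigit?).filterMap id),
         rs ++ (l.zip (l.map lastDigit?)).map pvStrip) := by
  induction l with
  | nil => intro c t rs; simp [pvT, PySem.List.index?]
  | cons x xs ih =>
      intro c t rs
      simp only [List.foldl_cons, List.map_cons, List.zip_cons_cons, List.map, checkStep,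
        List.filterMap_cons, pvStrip]
      cases h : lastDigit? x with
      | none =>
          simp only [lastDigit?] at h
          rw [h]
          simp [ih]
      | some curr =>
          simp only [lastDigit?] at h
          rw [h]
          simp only [ih, id_eq]
          rw [← pvT_cons c t curr]
          simp only [List.length_cons, Prod.mk.injEq]
          refine ⟨by push_cast; ring, trivial, by simp⟩

-- ===== VERDICT (by name: the statement is the Claim_ definition above) =====
theorem check_spec : Claim_equal_check := by
  intro l _
  unfold Spec_check check check_alt
  simp only [fold_char l 0 0 []]
  simp [pvT, pvStrip]
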